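-- pv_equiv track=rewrite | github.com/pythonxy/ECS145 | HW2/document.py | calcOffset
-- ===== SOURCE A (Python) =====
-- def calcOffset(lineText):
-- 	(words, nums) = lineText.split(" ")
-- 	baseOffset = len(words) + 1
-- 	nums = nums.split(",")
--
-- 	offset = nums[:]
--
-- 	offset[0] = baseOffset
-- 	for i in range(1, len(nums)):
-- 		offset[i] = 1 + offset[i-1] + len(nums[i-1])
--
-- 	return offset
-- ===== SOURCE B (Python) =====
-- def calcOffset(lineText):
--     (words, nums) = lineText.split(" ")
--     toks = nums.split(",")
--
--     def go(base, ts):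
--         # offsets for a run starting at base, then one past each token in ts
--         if not ts:
--             return [base]
--         return [base] + go(base + 1 + len(ts[0]), ts[1:])
--
--     return go(len(words) + 1, toks[:-1])
-- ===== Notes on version B (the rewrite author's own statement) =====
-- stated objective: alternative
-- what changed: Replaces the in-place index-chained array loop (offset[i] = 1 + offset[i-1] + len(nums[i-1])) by a structural recursion over the token list that threads the running offset and builds the result front-to-back, with no index arithmetic or list mutation.
import Mathlib
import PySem

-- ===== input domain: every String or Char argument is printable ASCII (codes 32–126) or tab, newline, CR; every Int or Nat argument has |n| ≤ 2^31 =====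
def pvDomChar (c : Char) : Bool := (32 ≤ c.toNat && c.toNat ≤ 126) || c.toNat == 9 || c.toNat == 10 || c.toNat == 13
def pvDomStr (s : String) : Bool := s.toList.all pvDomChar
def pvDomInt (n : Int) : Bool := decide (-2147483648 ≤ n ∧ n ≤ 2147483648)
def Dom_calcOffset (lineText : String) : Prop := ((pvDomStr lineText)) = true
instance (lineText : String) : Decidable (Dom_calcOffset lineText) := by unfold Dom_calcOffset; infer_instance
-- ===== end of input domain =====

-- B replaces A's in-place index-chained loop by a structural recursion threading the running
-- offset (objective: alternative decomposition, same O(n) cost).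

-- ===== PORT A =====
-- offset = nums[:] starts as a copy of the token list, but every slot is overwritten
-- (index 0, then indices 1..n-1), so the Int-typed port starts from a 0-filled list of the
-- same length; the loop is a fold over range(1, len(nums)) mutating the list by List.set.
-- split(",") with the nonempty separator never raises, so '.getD []' is exact there.
def calcOffset (lineText : String) : List Int :=
  match PySem.Str.split? lineText " " with
  | some [words, nums] =>
    let baseOffset : Int := PySem.Str.len words + 1
    let numsL := (PySem.Str.split? nums ",").getD []
    let offset : List Int := List.replicate numsL.length 0
    let offset := offset.set 0 baseOffset
    (PySem.List.pyRange 1 (numsL.length : Int) 1).foldl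
      (fun off i =>
        off.set i.toNat
          (1 + PySem.List.pyGetD off (i - 1) 0
             + PySem.Str.len (PySem.List.pyGetD numsL (i - 1) "")))
      offset
  | _ => []   -- Python raises ValueError (two-way unpacking); excluded by Pre_

-- ===== PORT B =====
-- helper go(base, ts) of Source B: offsets for a run starting at base, then one past each token of ts
def offsetsGo (base : Int) : List String → List Int
  | [] => [base]
  | t :: ts => base :: offsetsGo (base + 1 + PySem.Str.len t) ts

def calcOffset_alt (lineText : String) : List Int :=
  match PySem.Str.split? lineText " " with
  | none => []   -- unreachable: the separator " " is nonempty
  | some parts =>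
    -- the two-way unpack (words, nums) = …: succeeds exactly when there are two parts
    if hp : parts.length = 2 then
      let words := parts[0]'(by omega)
      let nums := parts[1]'(by omega)
      let toks := (PySem.Str.split? nums ",").getD []
      offsetsGo (PySem.Str.len words + 1) (PySem.List.slice toks none (some (-1)))
    else []   -- Python raises ValueError (two-way unpacking); excluded by Pre_

-- ===== PRECONDITION & SPEC =====
-- A raises ValueError unless splitting lineText on the space separator yields exactly two parts;
-- Pre_ admits exactly the inputs where the two-way unpack succeeds.
def Pre_calcOffset (lineText : String) : Prop :=
  ((PySem.Str.split? lineText " ").getD []).length = 2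
instance (lineText : String) : Decidable (Pre_calcOffset lineText) := by
  unfold Pre_calcOffset; infer_instance

def pvWitness_calcOffset : String := "ab 1,23"

def Spec_calcOffset (lineText : String) (out : List Int) : Prop := out = calcOffset_alt lineText
instance (lineText : String) (out : List Int) : Decidable (Spec_calcOffset lineText out) := by
  unfold Spec_calcOffset; infer_instance

-- ===== CLAIM (what is proved, stated in full; the proofs are below) =====
def Claim_equal_calcOffset : Prop := ∀ (lineText : String), Dom_calcOffset lineText → Pre_calcOffset lineText → Spec_calcOffset lineText (calcOffset lineText)

-- ===== LEMMAS AND PROOFS =====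

theorem offsetsGo_length (base : Int) (ts : List String) :
    (offsetsGo base ts).length = ts.length + 1 := by
  induction ts generalizing base with
  | nil => rfl
  | cons t ts ih => simp [offsetsGo, ih]

-- the running offset after the tokens of ts: base plus one-past-token increments
def runVal (base : Int) (ts : List String) : Int :=
  base + (ts.map (fun s => 1 + PySem.Str.len s)).sum

theorem offsetsGo_getD_last (base : Int) (ts : List String) (j : Nat)
    (hj : j = ts.length) :
    (offsetsGo base ts).getD j 0 = runVal base ts := by
  subst hj
  induction ts generalizing base with
  | nil => simp [offsetsGo, runVal]
  | cons t ts ih =>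
      simp only [offsetsGo, List.length_cons, List.getD_cons_succ, ih, runVal,
        List.map_cons, List.sum_cons]
      ring

theorem offsetsGo_snoc (base : Int) (ts : List String) (t : String) :
    offsetsGo base (ts ++ [t]) = offsetsGo base ts ++ [runVal base ts + 1 + PySem.Str.len t] := by
  induction ts generalizing base with
  | nil => simp [offsetsGo, runVal]
  | cons u ts ih =>
      simp only [List.cons_append, offsetsGo, ih, runVal, List.map_cons, List.sum_cons,
        List.cons_append]
      congr 3
      ring

-- PySem.Chars.splitOn.go always returns at least one piece (both terminal branches cons onto acc)
theorem splitOn_go_ne_nil (sep : List Char) (fuel : Nat) (l cur : List Char)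
    (acc : List (List Char)) :
    PySem.Chars.splitOn.go sep fuel l cur acc ≠ [] := by
  induction fuel generalizing l cur acc with
  | zero => unfold PySem.Chars.splitOn.go; simp
  | succ n ih =>
      unfold PySem.Chars.splitOn.go
      cases l with
      | nil => simp
      | cons c rest =>
          dsimp only
          split
          · exact ih _ _ _
          · exact ih _ _ _

-- the loop invariant: after the indices of range(1, k), the state is B's result on the
-- first k-1 tokens followed by the untouched zeros
theorem loop_invariant (toks : List String) (base : Int) (k : Nat)
    (h1 : 1 ≤ k) (h2 : k ≤ toks.length) :
    (PySem.List.pyRange 1 (k : Int) 1).foldl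
      (fun off i =>
        off.set i.toNat
          (1 + PySem.List.pyGetD off (i - 1) 0
             + PySem.Str.len (PySem.List.pyGetD toks (i - 1) "")))
      ((List.replicate toks.length (0 : Int)).set 0 base)
    = offsetsGo base (toks.take (k - 1)) ++ List.replicate (toks.length - k) 0 := by
  induction k with
  | zero => omega
  | succ k ih =>
    rcases Nat.eq_or_lt_of_le h1 with h1' | h1'
    · -- k + 1 = 1 : empty range, initial state
      have hk0 : k = 0 := by omega
      subst hk0
      obtain ⟨m, hm⟩ : ∃ m, toks.length = m + 1 := ⟨toks.length - 1, by omega⟩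
      rw [show ((0 + 1 : Nat) : Int) = 1 by norm_num, PySem.List.pyRange_one_eq_nil le_rfl]
      simp [offsetsGo, hm, List.replicate_succ]
    · -- k ≥ 1 : peel the last index k off the range
      have hk1 : 1 ≤ k := by omega
      have hkn : k ≤ toks.length := by omega
      have hklt : k - 1 < toks.length := by omega
      rw [show ((k + 1 : Nat) : Int) = (k : Int) + 1 by push_cast; ring,
        PySem.List.pyRange_one_succ_right (by exact_mod_cast hk1),
        List.foldl_append, ih hk1 hkn]
      simp only [List.foldl_cons, List.foldl_nil]
      set pre := offsetsGo base (toks.take (k - 1)) with hpre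
      have hlenpre : pre.length = k := by
        rw [hpre, offsetsGo_length, List.length_take]; omega
      have htonat : (k : Int).toNat = k := by omega
      have hsub : (k : Int) - 1 = ((k - 1 : Nat) : Int) := by omega
      rw [hsub, PySem.List.pyGetD_natCast, PySem.List.pyGetD_natCast]
      have hread : (pre ++ List.replicate (toks.length - k) (0 : Int)).getD (k - 1) 0
          = runVal base (toks.take (k - 1)) := by
        have hlt : k - 1 < pre.length := by omega
        rw [List.getD_eq_getElem?_getD, List.getElem?_append_left hlt,
          ← List.getD_eq_getElem?_getD, hpre]
        exact offsetsGo_getD_last base _ _ (by rw [List.length_take]; omega)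
      have htok : toks.getD (k - 1) "" = toks[k - 1]'hklt := by
        rw [List.getD_eq_getElem?_getD, List.getElem?_eq_getElem hklt]; rfl
      rw [htonat, hread, htok,
        show (1 : Int) + runVal base (toks.take (k - 1)) + PySem.Str.len (toks[k - 1]'hklt)
           = runVal base (toks.take (k - 1)) + 1 + PySem.Str.len (toks[k - 1]'hklt) from by ring]
      rw [show toks.length - k = (toks.length - (k + 1)) + 1 from by omega, List.replicate_succ]
      rw [List.set_append]
      simp only [hlenpre, lt_irrefl, Nat.sub_self, List.set_cons_zero]
      rw [show toks.take (k + 1 - 1) = toks.take (k - 1) ++ [toks[k - 1]'hklt] from by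
            rw [show k + 1 - 1 = (k - 1) + 1 from by omega, List.take_add_one,
              List.getElem?_eq_getElem hklt]; rfl,
        offsetsGo_snoc, hpre]
      simp

-- ===== VERDICT (by name: the statement is the Claim_ definition above) =====
theorem calcOffset_spec : Claim_equal_calcOffset := by
  intro lineText _ hpre
  unfold Spec_calcOffset calcOffset calcOffset_alt
  unfold Pre_calcOffset at hpre
  cases hs : PySem.Str.split? lineText " " with
  | none =>
      exfalso
      have hmap := PySem.Str.split?_map lineText " "
      rw [hs] at hmap
      simp [PySem.Chars.split?] at hmap
  | some l =>
      rw [hs] at hpre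
      simp only [Option.getD_some] at hpre
      rcases l with _ | ⟨words, _ | ⟨nums, _ | _⟩⟩ <;> simp at hpre
      simp only
      cases ht : PySem.Str.split? nums "," with
      | none =>
          exfalso
          have hmap := PySem.Str.split?_map nums ","
          rw [ht] at hmap
          simp [PySem.Chars.split?] at hmap
      | some toks =>
          have htne : toks ≠ [] := by
            intro h0
            have hmap := PySem.Str.split?_map nums ","
            rw [ht, h0] at hmap
            simp only [Option.map_some, List.map_nil, PySem.Chars.split?] at hmap
            rw [if_neg (by decide : ¬((("," : String).toList).isEmpty = true))] at hmap
            have h1 : PySem.Chars.splitOn nums.toList (",".toList) = [] :=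
              (Option.some.inj hmap).symm
            rw [PySem.Chars.splitOn] at h1
            exact splitOn_go_ne_nil _ _ _ _ _ h1
          rw [dif_pos (by simp : ([words, nums] : List String).length = 2)]
          simp only [List.getElem_cons_zero, List.getElem_cons_succ, ht, Option.getD_some]
          have hlen : 1 ≤ toks.length := by
            cases toks with
            | nil => exact absurd rfl htne
            | cons a l => simp
          rw [PySem.List.slice_to_neg_one,
            loop_invariant toks (PySem.Str.len words + 1) toks.length hlen le_rfl]
          rw [List.dropLast_eq_take]
          simp
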